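-- pv_equiv track=rewrite | github.com/datsun80zx/static_site_gen | src/block_parser.py | markdown_format_stripper
-- ===== SOURCE A (Python) =====
-- def markdown_format_stripper(block): # this function really only handles headers and code blocks however I didn't want to change the name everywhere it was used.
--     headings = {
--         '# ': 'h1',
--         '## ': 'h2',
--         '### ': 'h3',
--         '#### ': 'h4',
--         '##### ': 'h5',
--         '###### ': 'h6',
--     }
--     for heading in headings:
--         if block.startswith(heading):
--             return block.strip(heading)
--
--     if block.startswith('```') and block.endswith('```'):
--         return block.strip('```')
-- ===== SOURCE B (Python) =====
-- def markdown_format_stripper(block):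
--     # count leading '#' once instead of trying each heading prefix
--     c = len(block) - len(block.lstrip('#'))
--     if 1 <= c <= 6 and c < len(block) and block[c] == ' ':
--         return block.strip('# ')
--     if block.startswith('```') and block.endswith('```'):
--         return block.strip('`')
-- ===== Notes on version B (the rewrite author's own statement) =====
-- stated objective: simpler
-- what changed: Replaces the six-way dictionary-of-prefixes loop by a single count of leading '#' characters followed by one space check; the strip calls collapse to one char-set strip on each branch.
import Mathlib
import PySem

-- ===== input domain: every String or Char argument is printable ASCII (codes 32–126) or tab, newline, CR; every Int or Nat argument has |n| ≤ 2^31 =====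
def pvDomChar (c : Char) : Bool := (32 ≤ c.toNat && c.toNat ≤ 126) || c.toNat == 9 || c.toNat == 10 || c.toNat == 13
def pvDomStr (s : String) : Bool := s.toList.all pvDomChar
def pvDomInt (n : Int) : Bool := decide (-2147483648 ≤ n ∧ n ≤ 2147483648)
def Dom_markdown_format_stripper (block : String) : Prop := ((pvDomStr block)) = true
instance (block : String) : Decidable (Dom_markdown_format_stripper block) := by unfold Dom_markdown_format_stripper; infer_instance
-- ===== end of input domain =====

-- B replaces A's loop over a dictionary of six heading prefixes by one count of leading '#'
-- characters plus a space check (objective: simpler; same behaviour, return value only).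

-- ===== PORT A =====
-- the 'for heading in headings:' loop (first match returns block.strip(heading))
def mfsLoop (block : String) : List String → Option String
  | [] => none
  | h :: t =>
    if PySem.Str.startswith block h then some (PySem.Str.stripChars block h)
    else mfsLoop block t

def markdown_format_stripper (block : String) : Option String :=
  let headings : PySem.Dict String String :=
    (((((PySem.Dict.empty.insert "# " "h1").insert "## " "h2").insert "### " "h3").insert
        "#### " "h4").insert "##### " "h5").insert "###### " "h6"
  match mfsLoop block headings.keys with
  | some r => some r
  | none =>
    if PySem.Str.startswith block "```" && PySem.Str.endswith block "```" then
      some (PySem.Str.stripChars block "```")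
    else none

-- ===== PORT B =====
def markdown_format_stripper_alt (block : String) : Option String :=
  let l := block.toList
  -- c = len(block) - len(block.lstrip('#')) : lstrip('#') drops exactly the leading '#'s (exact)
  let c : Nat := l.length - (l.dropWhile (fun ch => ch == '#')).length
  if 1 ≤ c ∧ c ≤ 6 ∧ PySem.List.pyGet? l (c : Int) = some ' ' then
    some (PySem.Str.stripChars block "# ")
  else if PySem.Str.startswith block "```" && PySem.Str.endswith block "```" then
    some (PySem.Str.stripChars block "`")
  else none

-- ===== PRECONDITION & SPEC =====
def Spec_markdown_format_stripper (block : String) (out : Option String) : Prop := out = markdown_format_stripper_alt block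
instance (block : String) (out : Option String) : Decidable (Spec_markdown_format_stripper block out) := by unfold Spec_markdown_format_stripper; infer_instance

-- ===== CLAIM (what is proved, stated in full; the proofs are below) =====
def Claim_equal_markdown_format_stripper : Prop := ∀ (block : String), Dom_markdown_format_stripper block → Spec_markdown_format_stripper block (markdown_format_stripper block)

-- ===== LEMMAS AND PROOFS =====

-- stripChars only depends on the SET of characters of its second argument
theorem stripChars_congr (s : String) (c1 c2 : String)
    (h : ∀ ch, c1.toList.contains ch = c2.toList.contains ch) :
    PySem.Str.stripChars s c1 = PySem.Str.stripChars s c2 := by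
  unfold PySem.Str.stripChars PySem.Chars.stripChars
  rw [funext h]

theorem dropWhile_hash_replicate (k : Nat) (t : List Char) :
    List.dropWhile (fun ch => ch == '#') (List.replicate k '#' ++ ' ' :: t) = ' ' :: t := by
  induction k with
  | zero => simp
  | succ n ih => simp [List.replicate_succ, ih]

-- the heading '#'*k + ' ' is a prefix of l iff l has exactly k leading '#'s followed by ' '
theorem headMatch (l : List Char) (k : Nat) :
    PySem.Chars.startswith l (List.replicate k '#' ++ [' ']) = true ↔
      (l.length - (l.dropWhile (fun ch => ch == '#')).length = k ∧ l[k]? = some ' ') := by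
  rw [PySem.Chars.startswith_iff]
  constructor
  · rintro ⟨t, ht⟩
    rw [List.append_assoc, List.singleton_append] at ht
    subst ht
    refine ⟨?_, ?_⟩
    · rw [dropWhile_hash_replicate]
      simp
    · rw [List.getElem?_append_right (by simp)]
      simp
  · rintro ⟨hc, hg⟩
    have hsplit : l.takeWhile (fun ch => ch == '#') ++ l.dropWhile (fun ch => ch == '#') = l :=
      List.takeWhile_append_dropWhile
    have hlen2 : (l.takeWhile (fun ch => ch == '#')).length
        + (l.dropWhile (fun ch => ch == '#')).length = l.length := by
      rw [← List.length_append, hsplit]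
    have hdwle : (l.dropWhile (fun ch => ch == '#')).length ≤ l.length := by omega
    have hlen : (l.takeWhile (fun ch => ch == '#')).length = k := by omega
    have htw : l.takeWhile (fun ch => ch == '#') = List.replicate k '#' := by
      rw [List.eq_replicate_iff]
      refine ⟨hlen, ?_⟩
      intro b hb
      have := List.mem_takeWhile_imp hb
      simpa using this
    have hdw : ∃ t, l.dropWhile (fun ch => ch == '#') = ' ' :: t := by
      rw [← hsplit, List.getElem?_append_right (by omega), hlen] at hg
      cases hdwc : l.dropWhile (fun ch => ch == '#') with
      | nil => rw [hdwc] at hg; simp at hg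
      | cons a t =>
        rw [hdwc] at hg
        simp at hg
        exact ⟨t, by rw [hg]⟩
    obtain ⟨t, ht⟩ := hdw
    refine ⟨t, ?_⟩
    rw [List.append_assoc, List.singleton_append, ← htw, ← ht, hsplit]

theorem keys_headings :
    ((((((PySem.Dict.empty.insert "# " "h1").insert "## " "h2").insert "### " "h3").insert
        "#### " "h4").insert "##### " "h5").insert "###### " "h6" : PySem.Dict String String).keys
      = ["# ", "## ", "### ", "#### ", "##### ", "###### "] := by decide

-- specialised strip equalities
theorem strip2 (s : String) : PySem.Str.stripChars s "## " = PySem.Str.stripChars s "# " :=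
  stripChars_congr s _ _ (fun ch => by cases h : ch == '#' <;> simp)
theorem strip3 (s : String) : PySem.Str.stripChars s "### " = PySem.Str.stripChars s "# " :=
  stripChars_congr s _ _ (fun ch => by cases h : ch == '#' <;> simp)
theorem strip4 (s : String) : PySem.Str.stripChars s "#### " = PySem.Str.stripChars s "# " :=
  stripChars_congr s _ _ (fun ch => by cases h : ch == '#' <;> simp)
theorem strip5 (s : String) : PySem.Str.stripChars s "##### " = PySem.Str.stripChars s "# " :=
  stripChars_congr s _ _ (fun ch => by cases h : ch == '#' <;> simp)
theorem strip6 (s : String) : PySem.Str.stripChars s "###### " = PySem.Str.stripChars s "# " :=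
  stripChars_congr s _ _ (fun ch => by cases h : ch == '#' <;> simp)
theorem stripFence (s : String) : PySem.Str.stripChars s "```" = PySem.Str.stripChars s "`" :=
  stripChars_congr s _ _ (fun ch => by cases h : ch == '`' <;> simp)

-- ===== VERDICT (by name: the statement is the Claim_ definition above) =====
theorem markdown_format_stripper_spec : Claim_equal_markdown_format_stripper := by
  intro block _
  unfold Spec_markdown_format_stripper
  unfold markdown_format_stripper markdown_format_stripper_alt
  simp only [keys_headings]
  have h1 := headMatch block.toList 1; have h2 := headMatch block.toList 2
  have h3 := headMatch block.toList 3; have h4 := headMatch block.toList 4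
  have h5 := headMatch block.toList 5; have h6 := headMatch block.toList 6
  simp only [show List.replicate 1 '#' ++ [' '] = "# ".toList from rfl] at h1
  simp only [show List.replicate 2 '#' ++ [' '] = "## ".toList from rfl] at h2
  simp only [show List.replicate 3 '#' ++ [' '] = "### ".toList from rfl] at h3
  simp only [show List.replicate 4 '#' ++ [' '] = "#### ".toList from rfl] at h4
  simp only [show List.replicate 5 '#' ++ [' '] = "##### ".toList from rfl] at h5
  simp only [show List.replicate 6 '#' ++ [' '] = "###### ".toList from rfl] at h6
  have h1c := h1; have h2c := h2; have h3c := h3; have h4c := h4; have h5c := h5; have h6c := h6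
  simp only [show ("# ".toList : List Char) = ['#', ' '] from rfl] at h1c
  simp only [show ("## ".toList : List Char) = ['#', '#', ' '] from rfl] at h2c
  simp only [show ("### ".toList : List Char) = ['#', '#', '#', ' '] from rfl] at h3c
  simp only [show ("#### ".toList : List Char) = ['#', '#', '#', '#', ' '] from rfl] at h4c
  simp only [show ("##### ".toList : List Char) = ['#', '#', '#', '#', '#', ' '] from rfl] at h5c
  simp only [show ("###### ".toList : List Char) = ['#', '#', '#', '#', '#', '#', ' '] from rfl] at h6c
  by_cases hB : 1 ≤ block.toList.length - (block.toList.dropWhile (fun ch => ch == '#')).length ∧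
      block.toList.length - (block.toList.dropWhile (fun ch => ch == '#')).length ≤ 6 ∧
      block.toList[block.toList.length - (block.toList.dropWhile (fun ch => ch == '#')).length]?
        = some ' '
  · obtain ⟨hb1, hb2, hb3⟩ := hB
    have hkeq : block.toList.length - (block.toList.dropWhile (fun ch => ch == '#')).length = 1 ∨
        block.toList.length - (block.toList.dropWhile (fun ch => ch == '#')).length = 2 ∨
        block.toList.length - (block.toList.dropWhile (fun ch => ch == '#')).length = 3 ∨
        block.toList.length - (block.toList.dropWhile (fun ch => ch == '#')).length = 4 ∨
        block.toList.length - (block.toList.dropWhile (fun ch => ch == '#')).length = 5 ∨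
        block.toList.length - (block.toList.dropWhile (fun ch => ch == '#')).length = 6 := by
      omega
    rcases hkeq with hk | hk | hk | hk | hk | hk <;>
      (rw [hk] at h1c h2c h3c h4c h5c h6c hb3
       have hk' : block.length - (List.dropWhile (fun ch => ch == '#') block.toList).length
           = block.toList.length - (List.dropWhile (fun ch => ch == '#') block.toList).length := by
         rw [String.length_toList]
       rw [hk] at hk'
       have hlt := List.getElem?_eq_some_iff.mp hb3
       obtain ⟨hlt, heq⟩ := hlt
       rw [String.length_toList] at hlt
       simp [mfsLoop, PySem.Str.startswith_eq, h1c, h2c, h3c, h4c, h5c, h6c, hlt, heq,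
         PySem.List.pyGet?, PySem.List.pyIdx?, hk',
         strip2, strip3, strip4, strip5, strip6])
  · have nj : ∀ j : Nat, 1 ≤ j → j ≤ 6 →
        ¬ (block.toList.length - (block.toList.dropWhile (fun ch => ch == '#')).length = j ∧
            block.toList[j]? = some ' ') := by
      rintro j hj1 hj2 ⟨hcj, hg⟩
      exact hB ⟨by omega, by omega, by rw [hcj]; exact hg⟩
    have n1 := nj 1 (by norm_num) (by norm_num)
    have n2 := nj 2 (by norm_num) (by norm_num)
    have n3 := nj 3 (by norm_num) (by norm_num)
    have n4 := nj 4 (by norm_num) (by norm_num)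
    have n5 := nj 5 (by norm_num) (by norm_num)
    have n6 := nj 6 (by norm_num) (by norm_num)
    have hBpy : ¬ (1 ≤ block.toList.length - (block.toList.dropWhile (fun ch => ch == '#')).length ∧
        block.toList.length - (block.toList.dropWhile (fun ch => ch == '#')).length ≤ 6 ∧
        PySem.List.pyGet? block.toList
          ((block.toList.length - (block.toList.dropWhile (fun ch => ch == '#')).length : Nat) : Int)
          = some ' ') := by
      rw [PySem.List.pyGet?_natCast]; exact hB
    simp only [mfsLoop, PySem.Str.startswith_eq, h1, h2, h3, h4, h5, h6,
      n1, n2, n3, n4, n5, n6, if_false]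
    rw [if_neg hBpy, stripFence]
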